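-- pv_equiv track=rewrite | github.com/lingchuanbo/VTtsSub | video_tool/core/advanced_processor.py | _detect_speaker_changes
-- ===== SOURCE A (Python) =====
-- from typing import List, Dict, Any, Optional, Tuple
--
-- def _detect_speaker_changes(segments: List[Dict]) -> int:
--     """检测说话人变化次数"""
--     changes = 0
--     prev_style = None
--
--     for seg in segments:
--         text = seg.get("text", "")
--         # 简单启发式：检测问答模式
--         is_question = text.strip().endswith("?")
--         current_style = "question" if is_question else "statement"
--
--         if prev_style and current_style != prev_style:
--             changes += 1
--         prev_style = current_style
--
--     return changes
-- ===== SOURCE B (Python) =====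
-- def _detect_speaker_changes(segments):
--     """Divide-and-conquer: count style flips inside each half plus the boundary flip."""
--     styles = [seg.get("text", "").strip().endswith("?") for seg in segments]
--
--     def count(lst):
--         n = len(lst)
--         if n <= 1:
--             return 0
--         mid = n // 2
--         left, right = lst[:mid], lst[mid:]
--         return count(left) + count(right) + (1 if left[-1] != right[0] else 0)
--
--     return count(styles)
-- ===== Notes on version B (the rewrite author's own statement) =====
-- stated objective: alternative
-- what changed: Replaces the incremental prev-style scan with a divide-and-conquer over the derived boolean style list: split it in half, add the change counts of the halves plus one if the style flips at the boundary.
import Mathlib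
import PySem

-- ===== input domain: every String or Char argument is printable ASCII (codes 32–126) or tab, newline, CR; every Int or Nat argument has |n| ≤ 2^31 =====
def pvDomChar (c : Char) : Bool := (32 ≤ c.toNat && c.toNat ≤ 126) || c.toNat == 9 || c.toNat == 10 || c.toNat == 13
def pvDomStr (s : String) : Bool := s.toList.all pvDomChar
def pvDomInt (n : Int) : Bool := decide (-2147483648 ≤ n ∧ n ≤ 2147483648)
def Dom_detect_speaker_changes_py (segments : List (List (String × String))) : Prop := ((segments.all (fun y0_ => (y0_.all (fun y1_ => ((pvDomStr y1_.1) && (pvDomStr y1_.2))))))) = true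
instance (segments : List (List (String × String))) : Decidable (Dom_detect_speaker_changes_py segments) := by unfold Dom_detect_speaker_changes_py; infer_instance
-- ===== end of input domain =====

-- B replaces A's incremental prev-style scan with a divide-and-conquer over the derived
-- boolean style list (halve, recurse, add the boundary flip); same cost, different algorithm shape.
-- ===== PORT A =====
-- A's loop step: given (changes, prev_style) and one segment, exactly the loop body.
def pvStepA (st : Int × Option String) (seg : List (String × String)) : Int × Option String :=
  let text := PySem.Dict.getD (PySem.Dict.mk seg) "text" ""
  let is_question := PySem.Str.endswith (PySem.Str.strip text) "?"
  let current_style : String := if is_question then "question" else "statement"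
  (match st.2 with
   | some prev_style => if current_style ≠ prev_style then st.1 + 1 else st.1
   | none => st.1,
   some current_style)

def detect_speaker_changes_py (segments : List (List (String × String))) : Int :=
  (segments.foldl pvStepA (0, none)).1

-- ===== PORT B =====
-- the style comprehension: seg.get("text", "").strip().endswith("?")
def pvQ (seg : List (String × String)) : Bool :=
  PySem.Str.endswith (PySem.Str.strip (PySem.Dict.getD (PySem.Dict.mk seg) "text" "")) "?"

-- B's recursive count: lst[:mid] / lst[mid:]; left[-1] and right[0] are getLast!/head!
-- (both halves are nonempty whenever this branch runs, so these match Python's indexing).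
def pvCount (l : List Bool) : Int :=
  if l.length ≤ 1 then 0
  else
    pvCount (l.take (l.length / 2)) + pvCount (l.drop (l.length / 2)) +
      (if (l.take (l.length / 2)).getLast! ≠ (l.drop (l.length / 2)).head! then 1 else 0)
termination_by l.length
decreasing_by
  · simp [List.length_take]; omega
  · simp [List.length_drop]; omega

def detect_speaker_changes_py_alt (segments : List (List (String × String))) : Int :=
  pvCount (segments.map pvQ)

-- ===== PRECONDITION & SPEC =====
def Spec_detect_speaker_changes_py (segments : List (List (String × String))) (out : Int) : Prop := out = detect_speaker_changes_py_alt segments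
instance (segments : List (List (String × String))) (out : Int) : Decidable (Spec_detect_speaker_changes_py segments out) := by unfold Spec_detect_speaker_changes_py; infer_instance

-- ===== CLAIM (what is proved, stated in full; the proofs are below) =====
def Claim_equal_detect_speaker_changes_py : Prop := ∀ (segments : List (List (String × String))), Dom_detect_speaker_changes_py segments → Spec_detect_speaker_changes_py segments (detect_speaker_changes_py segments)

-- ===== LEMMAS AND PROOFS =====

-- reference quantity: number of adjacent flips in a boolean list
def pvC : List Bool → Int
  | [] => 0
  | [_] => 0
  | a :: b :: t => (if a = b then 0 else 1) + pvC (b :: t)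

def pvStyle (q : Bool) : String := if q then "question" else "statement"

lemma pvStyle_ne_iff (a b : Bool) : (pvStyle a ≠ pvStyle b) ↔ a ≠ b := by
  cases a <;> cases b <;> simp [pvStyle]

lemma pvC_append (xs ys : List Bool) (hx : xs ≠ []) (hy : ys ≠ []) :
    pvC (xs ++ ys) = pvC xs + pvC ys + (if xs.getLast! ≠ ys.head! then 1 else 0) := by
  induction xs with
  | nil => exact absurd rfl hx
  | cons a t ih =>
    cases t with
    | nil =>
      cases ys with
      | nil => exact absurd rfl hy
      | cons b u =>
        simp only [List.cons_append, List.nil_append, pvC, List.getLast!, List.head!]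
        by_cases h : a = b <;> simp [h] <;> try ring
    | cons x r =>
      have ih' := ih (by simp)
      simp only [List.cons_append] at *
      have hlast : (a :: x :: r).getLast! = (x :: r).getLast! := by
        simp [List.getLast!]
      calc pvC (a :: x :: r ++ ys)
          = (if a = x then 0 else 1) + pvC (x :: (r ++ ys)) := by
            simp [pvC]
        _ = (if a = x then 0 else 1) + (pvC (x :: r) + pvC ys + (if (x :: r).getLast! ≠ ys.head! then 1 else 0)) := by
            rw [← ih']; try simp
        _ = pvC (a :: x :: r) + pvC ys + (if (a :: x :: r).getLast! ≠ ys.head! then 1 else 0) := by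
            rw [hlast, show pvC (a :: x :: r) = (if a = x then 0 else 1) + pvC (x :: r) from rfl]
            try ring

lemma pvCount_eq (l : List Bool) : pvCount l = pvC l := by
  induction l using pvCount.induct with
  | case1 l hle =>
    rw [pvCount, if_pos hle]
    match l, hle with
    | [], _ => simp [pvC]
    | [a], _ => simp [pvC]
  | case2 l hle ih1 ih2 =>
    rw [pvCount, if_neg hle]
    rw [ih1, ih2]
    have h2 : 2 ≤ l.length := by omega
    have hx : l.take (l.length / 2) ≠ [] := by
      have hlt : (l.take (l.length / 2)).length = l.length / 2 := by
        simp [List.length_take]; omega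
      intro he; rw [he] at hlt; simp at hlt; omega
    have hy : l.drop (l.length / 2) ≠ [] := by
      have hld : (l.drop (l.length / 2)).length = l.length - l.length / 2 := by
        simp [List.length_drop]
      intro he; rw [he] at hld; simp at hld; omega
    conv_rhs => rw [← List.take_append_drop (l.length / 2) l]
    rw [pvC_append _ _ hx hy]

lemma pvLoop (l : List (List (String × String))) (b : Bool) (c : Int) :
    (l.foldl pvStepA (c, some (pvStyle b))).1 = c + pvC (b :: l.map pvQ) := by
  induction l generalizing b c with
  | nil => simp [pvC]
  | cons x t ih =>
    have hstep : pvStepA (c, some (pvStyle b)) x =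
        ((if pvStyle (pvQ x) ≠ pvStyle b then c + 1 else c), some (pvStyle (pvQ x))) := by
      rfl
    simp only [List.foldl_cons, hstep, List.map_cons]
    rw [ih]
    by_cases h : pvQ x = b
    · have : ¬ (pvStyle (pvQ x) ≠ pvStyle b) := by rw [pvStyle_ne_iff]; simp [h]
      have hb : b = pvQ x := h.symm
      simp [pvC, hb]
    · have : pvStyle (pvQ x) ≠ pvStyle b := (pvStyle_ne_iff _ _).mpr h
      have hb : ¬ b = pvQ x := fun hh => h hh.symm
      simp [pvC, hb]
      rw [if_neg this]
      ring

theorem pv_main (segments : List (List (String × String))) :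
    detect_speaker_changes_py segments = detect_speaker_changes_py_alt segments := by
  unfold detect_speaker_changes_py detect_speaker_changes_py_alt
  rw [pvCount_eq]
  cases segments with
  | nil => rfl
  | cons x t =>
    have hstep : pvStepA (0, none) x = (0, some (pvStyle (pvQ x))) := rfl
    simp only [List.foldl_cons, hstep, List.map_cons]
    rw [pvLoop]
    simp

-- ===== VERDICT (by name: the statement is the Claim_ definition above) =====
theorem detect_speaker_changes_py_spec : Claim_equal_detect_speaker_changes_py := by
  intro segments _
  exact pv_main segments
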